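-- pv_equiv track=rewrite | github.com/BioinfoMachineLearning/dagmsa | scripts/patch_monomer_alignment_file.py | getNRAlignmentIndex
-- ===== SOURCE A (Python) =====
-- def getNRAlignmentIndex(chained_alingment_dict, chain_num, bln):
--     all_keys=sorted(list(chained_alingment_dict.keys()))
--     pdb_code_keys=[]
--     for key in all_keys:
--         pdb_code_keys.append(key[0:4])
--     pdb_code_keys=sorted(list(set(pdb_code_keys)))
--     print ("PDBS=",pdb_code_keys)
--     selectedKeys=[]
--     key_found=False
--     for pdb_code in pdb_code_keys:
--         sublist=[]
--         for key in all_keys: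
--             if pdb_code==key[0:4]:
--                 sublist.append(key)
--                 key_found=True
--             else:
--                 if key_found==True:
--                     key_found=False
--                     break
--         if chain_num <= len(sublist):
--             print (sublist,chain_num)
--             selectedKeys.append(sublist[chain_num])
--
--     return sorted(selectedKeys), pdb_code_keys
-- ===== SOURCE B (Python) =====
-- def getNRAlignmentIndex(chained_alingment_dict, chain_num, bln):
--     # One pass over the sorted keys: equal 4-char prefixes are contiguous, so carry the
--     # current block along instead of re-scanning all keys once per prefix like A does.
--     all_keys = sorted(chained_alingment_dict.keys())
--     selected = []
--     pdb_code_keys = []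
--     if not all_keys:
--         return selected, pdb_code_keys
--     p = all_keys[0][0:4]
--     block = [all_keys[0]]
--     for k in all_keys[1:]:
--         q = k[0:4]
--         if q == p:
--             block.append(k)
--         else:
--             pdb_code_keys.append(p)
--             if -len(block) <= chain_num < len(block):
--                 selected.append(block[chain_num])
--             p = q
--             block = [k]
--     pdb_code_keys.append(p)
--     if -len(block) <= chain_num < len(block):
--         selected.append(block[chain_num])
--     return selected, pdb_code_keys
-- ===== Notes on version B (the rewrite author's own statement) =====
-- stated objective: faster
-- what changed: Instead of rescanning the whole sorted key list once per distinct PDB prefix (with the key_found/break bookkeeping), B walks the sorted keys once with two pointers, cutting out each contiguous equal-prefix block directly; the final sorted() of the selection and the sorted(set(...)) of the prefixes disappear because both come out already sorted.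
-- outside the precondition, e.g. on getNRAlignmentIndex({'AAAA1': 0}, 1, False): A raises IndexError, B returns ([], ['AAAA'])
-- crash fix: A raises IndexError whenever some prefix block of size m has chain_num == m or chain_num < -m (sublist[chain_num] out of range after the 'chain_num <= len(sublist)' test); B simply skips that block and returns normally. — e.g. on getNRAlignmentIndex([("AAAA1", 0)], 1, false): A raises IndexError, B returns ([], ["AAAA"])
import Mathlib
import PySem

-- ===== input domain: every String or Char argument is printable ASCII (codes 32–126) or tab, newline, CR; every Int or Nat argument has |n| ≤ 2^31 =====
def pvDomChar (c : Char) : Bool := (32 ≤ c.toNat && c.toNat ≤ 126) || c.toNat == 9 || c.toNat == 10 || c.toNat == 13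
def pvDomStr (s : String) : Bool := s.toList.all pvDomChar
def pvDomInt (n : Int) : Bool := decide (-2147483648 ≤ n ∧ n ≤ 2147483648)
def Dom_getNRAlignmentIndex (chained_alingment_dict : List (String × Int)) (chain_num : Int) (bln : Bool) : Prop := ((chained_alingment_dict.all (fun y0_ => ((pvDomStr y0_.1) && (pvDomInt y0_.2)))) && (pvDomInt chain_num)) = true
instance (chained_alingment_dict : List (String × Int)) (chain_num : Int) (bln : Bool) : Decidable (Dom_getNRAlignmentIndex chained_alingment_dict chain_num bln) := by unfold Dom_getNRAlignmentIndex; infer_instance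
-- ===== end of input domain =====

-- B replaces A's per-prefix rescan of the whole sorted key list by ONE pass over the sorted
-- keys that carries the current equal-prefix block (objective: faster; A's prints are dropped).

-- ===== PORT A =====
-- the inner 'for key in all_keys' loop with its key_found/break bookkeeping;
-- returns (sublist, key_found after the loop)
def pvAInner (pdb_code : String) : List String → List String → Bool → List String × Bool
  | [], sublist, key_found => (sublist, key_found)
  | key :: rest, sublist, key_found =>
    if pdb_code == PySem.Str.slice key (some 0) (some 4) then
      pvAInner pdb_code rest (sublist ++ [key]) true
    else
      if key_found == true then (sublist, false)   -- key_found=False; break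
      else pvAInner pdb_code rest sublist key_found

-- the outer 'for pdb_code in pdb_code_keys' loop (key_found persists across iterations)
def pvAOuter (chain_num : Int) (all_keys : List String) : List String → Bool → List String → List String
  | [], _, selectedKeys => selectedKeys
  | pdb_code :: ps, key_found, selectedKeys =>
    let r := pvAInner pdb_code all_keys [] key_found
    let selectedKeys' :=
      if chain_num ≤ (r.1.length : Int) then
        -- sublist[chain_num]; pyGet? = none is Python's IndexError, excluded by Pre_ (getD only totalizes)
        selectedKeys ++ [(PySem.List.pyGet? r.1 chain_num).getD ""]
      else selectedKeys
    pvAOuter chain_num all_keys ps r.2 selectedKeys'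

def getNRAlignmentIndex (chained_alingment_dict : List (String × Int)) (chain_num : Int) (bln : Bool) : List String × List String :=
  let all_keys := PySem.List.sorted (PySem.Dict.keys (PySem.Dict.ofList chained_alingment_dict)) (fun x => x) false
  let pdb_code_keys0 := all_keys.foldl (fun acc key => acc ++ [PySem.Str.slice key (some 0) (some 4)]) []
  let pdb_code_keys := PySem.List.sorted (PySem.Set.ofList pdb_code_keys0) (fun x => x) false
  let selectedKeys := pvAOuter chain_num all_keys pdb_code_keys false []
  (PySem.List.sorted selectedKeys (fun x => x) false, pdb_code_keys)

-- ===== PORT B =====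
-- the 'for k in all_keys[1:]' loop: p/block are the currently open equal-prefix block,
-- closed (prefix recorded, chain_num-th member picked if in range) when the prefix changes
def pvBScan (chain_num : Int) (p : String) (block : List String) : List String → List String × List String
  | [] =>
    ((match PySem.List.pyGet? block chain_num with
      | some x => [x]
      | none => []), [p])
  | k :: rest =>
    if PySem.Str.slice k (some 0) (some 4) == p then
      pvBScan chain_num p (block ++ [k]) rest
    else
      let r := pvBScan chain_num (PySem.Str.slice k (some 0) (some 4)) [k] rest
      ((match PySem.List.pyGet? block chain_num with
        | some x => x :: r.1
        | none => r.1), p :: r.2)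

def pvBRun (chain_num : Int) (all_keys : List String) : List String × List String :=
  match all_keys with
  | [] => ([], [])
  | k :: rest => pvBScan chain_num (PySem.Str.slice k (some 0) (some 4)) [k] rest

def getNRAlignmentIndex_alt (chained_alingment_dict : List (String × Int)) (chain_num : Int) (bln : Bool) : List String × List String :=
  pvBRun chain_num (PySem.List.sorted (PySem.Dict.keys (PySem.Dict.ofList chained_alingment_dict)) (fun x => x) false)

-- ===== PRECONDITION & SPEC =====
-- Pre_ excludes exactly the inputs where A raises IndexError: a 4-char-prefix block of size m with
-- chain_num = m or chain_num < -m (sublist[chain_num] after the 'chain_num <= len(sublist)' test).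
def Pre_getNRAlignmentIndex (chained_alingment_dict : List (String × Int)) (chain_num : Int) (bln : Bool) : Prop :=
  ∀ k ∈ PySem.Dict.keys (PySem.Dict.ofList chained_alingment_dict),
    (((PySem.Dict.keys (PySem.Dict.ofList chained_alingment_dict)).filter
        (fun k' => PySem.Str.slice k' (some 0) (some 4) == PySem.Str.slice k (some 0) (some 4))).length : Int) < chain_num ∨
    (-((((PySem.Dict.keys (PySem.Dict.ofList chained_alingment_dict)).filter
        (fun k' => PySem.Str.slice k' (some 0) (some 4) == PySem.Str.slice k (some 0) (some 4))).length : Int)) ≤ chain_num ∧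
      chain_num < (((PySem.Dict.keys (PySem.Dict.ofList chained_alingment_dict)).filter
        (fun k' => PySem.Str.slice k' (some 0) (some 4) == PySem.Str.slice k (some 0) (some 4))).length : Int))
instance (chained_alingment_dict : List (String × Int)) (chain_num : Int) (bln : Bool) : Decidable (Pre_getNRAlignmentIndex chained_alingment_dict chain_num bln) := by unfold Pre_getNRAlignmentIndex; infer_instance
def pvWitness_getNRAlignmentIndex : (List (String × Int)) × Int × Bool := ([("AAAA1", 0), ("AAAA2", 1), ("BBBB1", 2)], 0, false)

-- A raises IndexError whenever some prefix block of size m has chain_num = m or chain_num < -m; B skips that block and returns normally.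
def Raises_getNRAlignmentIndex (chained_alingment_dict : List (String × Int)) (chain_num : Int) (bln : Bool) : Prop :=
  ¬ Pre_getNRAlignmentIndex chained_alingment_dict chain_num bln
instance (chained_alingment_dict : List (String × Int)) (chain_num : Int) (bln : Bool) : Decidable (Raises_getNRAlignmentIndex chained_alingment_dict chain_num bln) := by unfold Raises_getNRAlignmentIndex; infer_instance
def pvRaiseWitness_getNRAlignmentIndex : (List (String × Int)) × Int × Bool := ([("AAAA1", 0)], 1, false)
def pvRaiseWitnessOut_getNRAlignmentIndex : List String × List String := ([], ["AAAA"])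

def Spec_getNRAlignmentIndex (chained_alingment_dict : List (String × Int)) (chain_num : Int) (bln : Bool) (out : List String × List String) : Prop := out = getNRAlignmentIndex_alt chained_alingment_dict chain_num bln
instance (chained_alingment_dict : List (String × Int)) (chain_num : Int) (bln : Bool) (out : List String × List String) : Decidable (Spec_getNRAlignmentIndex chained_alingment_dict chain_num bln out) := by unfold Spec_getNRAlignmentIndex; infer_instance

-- ===== CLAIM (what is proved, stated in full; the proofs are below) =====
def Claim_equal_getNRAlignmentIndex : Prop := ∀ (chained_alingment_dict : List (String × Int)) (chain_num : Int) (bln : Bool), Dom_getNRAlignmentIndex chained_alingment_dict chain_num bln → Pre_getNRAlignmentIndex chained_alingment_dict chain_num bln → Spec_getNRAlignmentIndex chained_alingment_dict chain_num bln (getNRAlignmentIndex chained_alingment_dict chain_num bln)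
def Claim_raises_getNRAlignmentIndex : Prop := (∀ (chained_alingment_dict : List (String × Int)) (chain_num : Int) (bln : Bool), Dom_getNRAlignmentIndex chained_alingment_dict chain_num bln → Raises_getNRAlignmentIndex chained_alingment_dict chain_num bln → ¬ Pre_getNRAlignmentIndex chained_alingment_dict chain_num bln) ∧ (Dom_getNRAlignmentIndex (pvRaiseWitness_getNRAlignmentIndex.1) (pvRaiseWitness_getNRAlignmentIndex.2.1) (pvRaiseWitness_getNRAlignmentIndex.2.2) ∧ Raises_getNRAlignmentIndex (pvRaiseWitness_getNRAlignmentIndex.1) (pvRaiseWitness_getNRAlignmentIndex.2.1) (pvRaiseWitness_getNRAlignmentIndex.2.2) ∧ getNRAlignmentIndex_alt (pvRaiseWitness_getNRAlignmentIndex.1) (pvRaiseWitness_getNRAlignmentIndex.2.1) (pvRaiseWitness_getNRAlignmentIndex.2.2) = pvRaiseWitnessOut_getNRAlignmentIndex)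

-- ===== LEMMAS AND PROOFS =====

-- the 4-char prefix, abbreviated for the proofs
def pvPref (k : String) : String := PySem.Str.slice k (some 0) (some 4)

theorem pvPref_eq (k : String) : PySem.Str.slice k (some 0) (some 4) = pvPref k := rfl

theorem pvPref_ofList (s : String) : pvPref s = String.ofList (s.toList.take 4) := by
  simp [pvPref, PySem.Str.slice, PySem.Chars.slice_eq_listSlice,
    PySem.List.slice_to (xs := s.toList) (b := 4) (by norm_num)]

theorem pvTake_mono_lt (n : Nat) (l m : List Char) (h : l < m) :
    l.take n < m.take n ∨ l.take n = m.take n := by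
  induction n generalizing l m with
  | zero => simp
  | succ n ih =>
    cases l with
    | nil =>
      cases m with
      | nil => simp at h
      | cons b bs => left; simp [List.nil_lt_cons]
    | cons a as =>
      cases m with
      | nil => exact absurd h (List.not_lt_nil _)
      | cons b bs =>
        rcases List.cons_lt_cons_iff.mp h with hab | ⟨rfl, hlt⟩
        · left; simp [List.cons_lt_cons_iff, hab]
        · rcases ih _ _ hlt with h1 | h1
          · left; simp [h1]
          · right; simp [h1]

theorem pvPref_mono {s t : String} (h : s ≤ t) : pvPref s ≤ pvPref t := by
  rcases lt_or_eq_of_le h with h | rfl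
  · rw [pvPref_ofList, pvPref_ofList]
    rcases pvTake_mono_lt 4 s.toList t.toList (String.lt_iff_toList_lt.mp h) with h1 | h1
    · exact le_of_lt (String.lt_iff_toList_lt.mpr (by simpa using h1))
    · exact le_of_eq (by rw [h1])
  · exact le_rfl

-- A's inner loop skips a prefix of non-matching keys unchanged (key_found still False)
theorem pvAInner_skip (p : String) (l1 l2 sub : List String)
    (h : ∀ x ∈ l1, pvPref x ≠ p) :
    pvAInner p (l1 ++ l2) sub false = pvAInner p l2 sub false := by
  induction l1 with
  | nil => rfl
  | cons x t1 ih =>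
    have hx : (p == PySem.Str.slice x (some 0) (some 4)) = false := by
      simp only [beq_eq_false_iff_ne, ne_eq]
      exact fun e => h x (by simp) e.symm
    simp only [List.cons_append, pvAInner, hx, Bool.false_eq_true, if_false]
    exact ih (fun y hy => h y (by simp [hy]))

-- A's inner loop consumes a whole matching block, setting key_found
theorem pvAInner_block (p : String) (blk : List String) (hne : blk ≠ [])
    (hall : ∀ x ∈ blk, pvPref x = p) (l2 sub : List String) (kf : Bool) :
    pvAInner p (blk ++ l2) sub kf = pvAInner p l2 (sub ++ blk) true := by
  revert hne hall
  induction blk generalizing sub kf with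
  | nil => intro hne _; exact absurd rfl hne
  | cons b bt ih =>
    intro _ hall
    have hb : (p == PySem.Str.slice b (some 0) (some 4)) = true := by
      simp only [beq_iff_eq]; exact (hall b (by simp)).symm
    simp only [List.cons_append, pvAInner, hb, if_true]
    cases bt with
    | nil => simp
    | cons b2 bt2 =>
      rw [ih (sub ++ [b]) true (by simp) (fun y hy => hall y (by simp [hy]))]
      simp

-- A's inner loop breaks at the first non-matching key once key_found is set
theorem pvAInner_stop (p h : String) (t sub : List String) (hh : pvPref h ≠ p) :
    pvAInner p (h :: t) sub true = (sub, false) := by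
  have hh' : (p == PySem.Str.slice h (some 0) (some 4)) = false := by
    simp only [beq_eq_false_iff_ne, ne_eq]
    exact fun e => hh e.symm
  simp [pvAInner, hh']

theorem pv_foldl_add_cons (p : String) (l acc : List String) (h : p ∉ l) :
    l.foldl PySem.Set.add (p :: acc) = p :: l.foldl PySem.Set.add acc := by
  induction l generalizing acc with
  | nil => rfl
  | cons x xs ih =>
    have hxp : (x == p) = false := by
      simp only [beq_eq_false_iff_ne, ne_eq]
      exact fun e => h (by simp [← e])
    have hadd : PySem.Set.add (p :: acc) x = p :: PySem.Set.add acc x := by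
      simp only [PySem.Set.add, PySem.Set.contains, List.contains_cons, hxp, Bool.false_or]
      split_ifs with hmem <;> simp
    rw [List.foldl_cons, hadd, List.foldl_cons]
    exact ih _ (fun e => h (by simp [e]))

theorem pv_foldl_add_const (p : String) (l : List String) (h : ∀ x ∈ l, x = p) :
    l.foldl PySem.Set.add [p] = [p] := by
  induction l with
  | nil => rfl
  | cons x xs ih =>
    have hx : x = p := h x (by simp)
    subst hx
    have hadd : PySem.Set.add [x] x = [x] := by simp [PySem.Set.add, PySem.Set.contains]
    rw [List.foldl_cons, hadd]
    exact ih (fun y hy => h y (by simp [hy]))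

theorem pv_dropWhile_head_false {α : Type} (q : α → Bool) (l : List α) (h0 : α) (t0 : List α)
    (h : l.dropWhile q = h0 :: t0) : q h0 = false := by
  induction l with
  | nil => simp at h
  | cons a t ih =>
    rw [List.dropWhile_cons] at h
    by_cases hqa : q a = true
    · exact ih (by simpa [hqa] using h)
    · simp only [hqa] at h
      cases h
      simpa using hqa

-- on a sorted key list, everything past the dropped block has a different (larger) prefix
theorem pvRest_not_pref (k : String) (rest : List String)
    (hs : List.Pairwise (· ≤ ·) (k :: rest)) :
    ∀ x ∈ rest.dropWhile (fun k' => PySem.Str.slice k' (some 0) (some 4) == PySem.Str.slice k (some 0) (some 4)),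
      pvPref x ≠ pvPref k := by
  intro x hx
  set q := fun k' => PySem.Str.slice k' (some 0) (some 4) == PySem.Str.slice k (some 0) (some 4) with hq
  have hsubrest : (rest.dropWhile q).Sublist rest := List.dropWhile_sublist q
  cases hd : rest.dropWhile q with
  | nil => rw [hd] at hx; simp at hx
  | cons h0 t0 =>
    have hqh := pv_dropWhile_head_false q rest h0 t0 hd
    simp only [hq, beq_eq_false_iff_ne, ne_eq] at hqh
    have hh0 : pvPref h0 ≠ pvPref k := hqh
    have hmem0 : h0 ∈ rest := hsubrest.mem (by rw [hd]; simp)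
    have hk0 : k ≤ h0 := (List.pairwise_cons.mp hs).1 h0 hmem0
    have hlt : pvPref k < pvPref h0 := lt_of_le_of_ne (pvPref_mono hk0) (Ne.symm hh0)
    have hpx : pvPref h0 ≤ pvPref x := by
      rw [hd] at hx
      rcases List.mem_cons.mp hx with rfl | hx'
      · exact le_rfl
      · have hpw : List.Pairwise (· ≤ ·) (rest.dropWhile q) :=
          ((List.pairwise_cons.mp hs).2).sublist hsubrest
        rw [hd] at hpw
        exact pvPref_mono ((List.pairwise_cons.mp hpw).1 x hx')
    exact fun e => absurd (e ▸ (lt_of_lt_of_le hlt hpx)) (lt_irrefl _)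

-- B's scan absorbs keys matching the open prefix into the block
theorem pvBScan_take (c : Int) (p : String) (tw : List String)
    (hall : ∀ x ∈ tw, PySem.Str.slice x (some 0) (some 4) = p) (block l2 : List String) :
    pvBScan c p block (tw ++ l2) = pvBScan c p (block ++ tw) l2 := by
  induction tw generalizing block with
  | nil => simp
  | cons x xs ih =>
    have hx : (PySem.Str.slice x (some 0) (some 4) == p) = true := by
      simp only [beq_iff_eq]; exact hall x (by simp)
    simp only [List.cons_append, pvBScan, hx, if_true]
    rw [ih (fun y hy => hall y (by simp [hy])) (block ++ [x])]
    simp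

-- B decomposed one block at a time
theorem pvBRun_block (c : Int) (k : String) (rest : List String) :
    pvBRun c (k :: rest) =
      ((match PySem.List.pyGet? (k :: rest.takeWhile (fun k' => PySem.Str.slice k' (some 0) (some 4) == PySem.Str.slice k (some 0) (some 4))) c with
        | some x => x :: (pvBRun c (rest.dropWhile (fun k' => PySem.Str.slice k' (some 0) (some 4) == PySem.Str.slice k (some 0) (some 4)))).1
        | none => (pvBRun c (rest.dropWhile (fun k' => PySem.Str.slice k' (some 0) (some 4) == PySem.Str.slice k (some 0) (some 4)))).1),
       PySem.Str.slice k (some 0) (some 4) :: (pvBRun c (rest.dropWhile (fun k' => PySem.Str.slice k' (some 0) (some 4) == PySem.Str.slice k (some 0) (some 4)))).2) := by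
  set q := fun k' => PySem.Str.slice k' (some 0) (some 4) == PySem.Str.slice k (some 0) (some 4) with hq
  have hsplit : rest = rest.takeWhile q ++ rest.dropWhile q := (List.takeWhile_append_dropWhile (p := q) (l := rest)).symm
  have htw : ∀ x ∈ rest.takeWhile q, PySem.Str.slice x (some 0) (some 4) = PySem.Str.slice k (some 0) (some 4) := by
    intro x hx
    have := List.mem_takeWhile_imp hx
    simpa [hq] using this
  show pvBScan c (PySem.Str.slice k (some 0) (some 4)) [k] rest = _
  conv_lhs => rw [hsplit]
  rw [pvBScan_take c (PySem.Str.slice k (some 0) (some 4)) (rest.takeWhile q) htw [k] (rest.dropWhile q)]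
  cases hd : rest.dropWhile q with
  | nil => simp [pvBScan, pvBRun]
  | cons h0 t0 =>
    have hqh : (PySem.Str.slice h0 (some 0) (some 4) == PySem.Str.slice k (some 0) (some 4)) = false := by
      simpa [hq] using pv_dropWhile_head_false q rest h0 t0 hd
    simp only [pvBScan, hqh, Bool.false_eq_true, if_false, pvBRun, List.cons_append, List.nil_append]

theorem pvBRun_sel_mem (c : Int) : ∀ (n : Nat) (keys : List String), keys.length ≤ n →
    ∀ x ∈ (pvBRun c keys).1, x ∈ keys := by
  intro n
  induction n with
  | zero => intro keys hlen; rw [List.length_eq_zero_iff.mp (Nat.le_zero.mp hlen)]; simp [pvBRun]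
  | succ n ih =>
    intro keys hlen x hx
    cases keys with
    | nil => simp [pvBRun] at hx
    | cons k rest =>
      rw [pvBRun_block] at hx
      set q := fun k' => PySem.Str.slice k' (some 0) (some 4) == PySem.Str.slice k (some 0) (some 4) with hq
      have hlen' : (rest.dropWhile q).length ≤ n := by
        have h1 := List.length_dropWhile_le q rest
        simp only [List.length_cons] at hlen
        omega
      have hmem : ∀ y ∈ (pvBRun c (rest.dropWhile q)).1, y ∈ k :: rest := by
        intro y hy
        have := ih _ hlen' y hy
        exact List.mem_cons_of_mem _ ((List.dropWhile_sublist q).mem this)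
      cases hg : PySem.List.pyGet? (k :: rest.takeWhile q) c with
      | none => rw [hg] at hx; exact hmem x hx
      | some v =>
        simp only [hg] at hx
        rcases List.mem_cons.mp hx with rfl | hx'
        · have := PySem.List.mem_of_pyGet?_eq_some _ hg
          rcases List.mem_cons.mp this with rfl | h2
          · simp
          · exact List.mem_cons_of_mem _ ((List.takeWhile_sublist q).mem h2)
        · exact hmem x hx'

theorem pvBRun_ps_mem (c : Int) : ∀ (n : Nat) (keys : List String), keys.length ≤ n →
    ∀ p' ∈ (pvBRun c keys).2, p' ∈ keys.map pvPref := by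
  intro n
  induction n with
  | zero => intro keys hlen; rw [List.length_eq_zero_iff.mp (Nat.le_zero.mp hlen)]; simp [pvBRun]
  | succ n ih =>
    intro keys hlen p' hp'
    cases keys with
    | nil => simp [pvBRun] at hp'
    | cons k rest =>
      rw [pvBRun_block] at hp'
      set q := fun k' => PySem.Str.slice k' (some 0) (some 4) == PySem.Str.slice k (some 0) (some 4) with hq
      have hlen' : (rest.dropWhile q).length ≤ n := by
        have h1 := List.length_dropWhile_le q rest
        simp only [List.length_cons] at hlen
        omega
      rcases List.mem_cons.mp hp' with rfl | hp2
      · simp [pvPref]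
      · have := ih _ hlen' p' hp2
        rcases List.mem_map.mp this with ⟨y, hy, rfl⟩
        exact List.mem_map_of_mem (List.mem_cons_of_mem _ ((List.dropWhile_sublist q).mem hy))

-- B's prefix output is exactly set(prefixes) (Python set keeps first occurrences)
theorem pvBRun_ps_eq (c : Int) : ∀ (n : Nat) (keys : List String), keys.length ≤ n →
    List.Pairwise (· ≤ ·) keys →
    (pvBRun c keys).2 = PySem.Set.ofList (keys.map pvPref) := by
  intro n
  induction n with
  | zero => intro keys hlen _; rw [List.length_eq_zero_iff.mp (Nat.le_zero.mp hlen)]; rfl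
  | succ n ih =>
    intro keys hlen hs
    cases keys with
    | nil => rfl
    | cons k rest =>
      rw [pvBRun_block]
      set q := fun k' => PySem.Str.slice k' (some 0) (some 4) == PySem.Str.slice k (some 0) (some 4) with hq
      have hlen' : (rest.dropWhile q).length ≤ n := by
        have h1 := List.length_dropWhile_le q rest
        simp only [List.length_cons] at hlen
        omega
      have hs' : List.Pairwise (· ≤ ·) (rest.dropWhile q) :=
        ((List.pairwise_cons.mp hs).2).sublist (List.dropWhile_sublist q)
      have hsplit : rest = rest.takeWhile q ++ rest.dropWhile q := (List.takeWhile_append_dropWhile (p := q) (l := rest)).symm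
      have htw : ∀ x ∈ rest.takeWhile q, pvPref x = pvPref k := by
        intro x hx
        have := List.mem_takeWhile_imp hx
        simpa [hq, pvPref] using this
      have hdw : ∀ x ∈ rest.dropWhile q, pvPref x ≠ pvPref k := pvRest_not_pref k rest hs
      have hnotin : pvPref k ∉ (rest.dropWhile q).map pvPref := by
        intro hmem
        rcases List.mem_map.mp hmem with ⟨y, hy, he⟩
        exact hdw y hy he
      have hofl : PySem.Set.ofList ((k :: rest).map pvPref) =
          pvPref k :: PySem.Set.ofList ((rest.dropWhile q).map pvPref) := by
        conv_lhs => rw [hsplit]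
        rw [List.map_cons, List.map_append]
        show (pvPref k :: ((rest.takeWhile q).map pvPref ++ (rest.dropWhile q).map pvPref)).foldl PySem.Set.add [] =
          pvPref k :: ((rest.dropWhile q).map pvPref).foldl PySem.Set.add []
        rw [List.foldl_cons, List.foldl_append]
        have h1 : PySem.Set.add [] (pvPref k) = [pvPref k] := rfl
        rw [h1, pv_foldl_add_const (pvPref k) _ (by
          intro y hy
          rcases List.mem_map.mp hy with ⟨z, hz, rfl⟩
          exact htw z hz)]
        exact pv_foldl_add_cons _ _ _ hnotin
      rw [hofl, ih _ hlen' hs']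
      rfl

theorem pvBRun_ps_lt (c : Int) : ∀ (n : Nat) (keys : List String), keys.length ≤ n →
    List.Pairwise (· ≤ ·) keys →
    List.Pairwise (· < ·) (pvBRun c keys).2 := by
  intro n
  induction n with
  | zero => intro keys hlen _; rw [List.length_eq_zero_iff.mp (Nat.le_zero.mp hlen)]; simp [pvBRun]
  | succ n ih =>
    intro keys hlen hs
    cases keys with
    | nil => simp [pvBRun]
    | cons k rest =>
      rw [pvBRun_block]
      set q := fun k' => PySem.Str.slice k' (some 0) (some 4) == PySem.Str.slice k (some 0) (some 4) with hq
      have hlen' : (rest.dropWhile q).length ≤ n := by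
        have h1 := List.length_dropWhile_le q rest
        simp only [List.length_cons] at hlen
        omega
      have hs' : List.Pairwise (· ≤ ·) (rest.dropWhile q) :=
        ((List.pairwise_cons.mp hs).2).sublist (List.dropWhile_sublist q)
      have hdw : ∀ x ∈ rest.dropWhile q, pvPref x ≠ pvPref k := pvRest_not_pref k rest hs
      refine List.pairwise_cons.mpr ⟨?_, ih _ hlen' hs'⟩
      intro p' hp'
      have hp'mem := pvBRun_ps_mem c _ _ hlen' p' hp'
      rcases List.mem_map.mp hp'mem with ⟨y, hy, rfl⟩
      have hky : k ≤ y := (List.pairwise_cons.mp hs).1 y ((List.dropWhile_sublist q).mem hy)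
      exact lt_of_le_of_ne (pvPref_mono hky) (fun e => hdw y hy e.symm)

theorem pvBRun_sel_pairwise (c : Int) : ∀ (n : Nat) (keys : List String), keys.length ≤ n →
    List.Pairwise (· ≤ ·) keys →
    List.Pairwise (· ≤ ·) (pvBRun c keys).1 := by
  intro n
  induction n with
  | zero => intro keys hlen _; rw [List.length_eq_zero_iff.mp (Nat.le_zero.mp hlen)]; simp [pvBRun]
  | succ n ih =>
    intro keys hlen hs
    cases keys with
    | nil => simp [pvBRun]
    | cons k rest =>
      rw [pvBRun_block]
      set q := fun k' => PySem.Str.slice k' (some 0) (some 4) == PySem.Str.slice k (some 0) (some 4) with hq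
      have hlen' : (rest.dropWhile q).length ≤ n := by
        have h1 := List.length_dropWhile_le q rest
        simp only [List.length_cons] at hlen
        omega
      have hs' : List.Pairwise (· ≤ ·) (rest.dropWhile q) :=
        ((List.pairwise_cons.mp hs).2).sublist (List.dropWhile_sublist q)
      have hrec := ih _ hlen' hs'
      cases hg : PySem.List.pyGet? (k :: rest.takeWhile q) c with
      | none => exact hrec
      | some v =>
        show List.Pairwise (· ≤ ·) (v :: (pvBRun c (rest.dropWhile q)).1)
        refine List.pairwise_cons.mpr ⟨?_, hrec⟩
        intro y hy
        have hymem := pvBRun_sel_mem c _ _ hlen' y hy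
        have hyrest : y ∈ rest := (List.dropWhile_sublist q).mem hymem
        have hvmem := PySem.List.mem_of_pyGet?_eq_some _ hg
        rcases List.mem_cons.mp hvmem with rfl | hv2
        · exact (List.pairwise_cons.mp hs).1 y hyrest
        · have hrest : List.Pairwise (· ≤ ·) rest := (List.pairwise_cons.mp hs).2
          have hsplit : rest = rest.takeWhile q ++ rest.dropWhile q := (List.takeWhile_append_dropWhile (p := q) (l := rest)).symm
          rw [hsplit] at hrest
          exact ((List.pairwise_append.mp hrest).2.2) v hv2 y hymem

-- the main invariant: A's outer loop over B's prefix list, scanning done ++ keys with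
-- key_found initially False, selects exactly what B's single pass selects
theorem pvM (c : Int) : ∀ (n : Nat) (keys done sel : List String), keys.length ≤ n →
    List.Pairwise (· ≤ ·) keys →
    (∀ k ∈ done, pvPref k ∉ keys.map pvPref) →
    (∀ k ∈ keys,
      ((keys.filter (fun k' => PySem.Str.slice k' (some 0) (some 4) == PySem.Str.slice k (some 0) (some 4))).length : Int) < c ∨
      (-(((keys.filter (fun k' => PySem.Str.slice k' (some 0) (some 4) == PySem.Str.slice k (some 0) (some 4))).length : Int)) ≤ c ∧
        c < ((keys.filter (fun k' => PySem.Str.slice k' (some 0) (some 4) == PySem.Str.slice k (some 0) (some 4))).length : Int))) →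
    pvAOuter c (done ++ keys) (pvBRun c keys).2 false sel = sel ++ (pvBRun c keys).1 := by
  intro n
  induction n with
  | zero => intro keys done sel hlen _ _ _; rw [List.length_eq_zero_iff.mp (Nat.le_zero.mp hlen)]; simp [pvBRun, pvAOuter]
  | succ n ih =>
    intro keys done sel hlen hs hdone hpre
    cases keys with
    | nil => simp [pvBRun, pvAOuter]
    | cons k rest =>
      rw [pvBRun_block]
      set q := fun k' => PySem.Str.slice k' (some 0) (some 4) == PySem.Str.slice k (some 0) (some 4) with hq
      have hlen' : (rest.dropWhile q).length ≤ n := by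
        have h1 := List.length_dropWhile_le q rest
        simp only [List.length_cons] at hlen
        omega
      have hs' : List.Pairwise (· ≤ ·) (rest.dropWhile q) :=
        ((List.pairwise_cons.mp hs).2).sublist (List.dropWhile_sublist q)
      have hsplit : rest = rest.takeWhile q ++ rest.dropWhile q := (List.takeWhile_append_dropWhile (p := q) (l := rest)).symm
      have htw : ∀ x ∈ k :: rest.takeWhile q, pvPref x = pvPref k := by
        intro x hx
        rcases List.mem_cons.mp hx with rfl | hx'
        · rfl
        · have := List.mem_takeWhile_imp hx'
          simpa [hq, pvPref] using this
      have hdw : ∀ x ∈ rest.dropWhile q, pvPref x ≠ pvPref k := pvRest_not_pref k rest hs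
      have hdone' : ∀ x ∈ done, pvPref x ≠ pvPref k := by
        intro x hx e
        exact hdone x hx (by rw [e]; simp)
      -- evaluate A's inner loop on done ++ block ++ dropped
      have hinner : pvAInner (PySem.Str.slice k (some 0) (some 4)) (done ++ (k :: rest)) [] false =
          pvAInner (PySem.Str.slice k (some 0) (some 4)) (rest.dropWhile q) (k :: rest.takeWhile q) true := by
        rw [show done ++ (k :: rest) = done ++ ((k :: rest.takeWhile q) ++ rest.dropWhile q) by
          rw [List.cons_append, ← hsplit]]
        rw [pvAInner_skip (PySem.Str.slice k (some 0) (some 4)) done _ []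
          (fun x hx => hdone' x hx)]
        rw [pvAInner_block (PySem.Str.slice k (some 0) (some 4)) (k :: rest.takeWhile q) (by simp)
          (fun x hx => (htw x hx : pvPref x = PySem.Str.slice k (some 0) (some 4))) (rest.dropWhile q) [] false]
        rw [List.nil_append]
      -- the whole-list filter for k's prefix is exactly the block
      have hfilter : (k :: rest).filter q = k :: rest.takeWhile q := by
        conv_lhs => rw [show k :: rest = (k :: rest.takeWhile q) ++ rest.dropWhile q by rw [List.cons_append, ← hsplit]]
        rw [List.filter_append,
          List.filter_eq_self.mpr (by
            intro a ha
            simp only [hq, beq_iff_eq]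
            exact htw a ha),
          List.filter_eq_nil_iff.mpr (by
            intro a ha
            simp only [hq, beq_iff_eq]
            exact hdw a ha)]
        simp
      have hpk := hpre k (by simp)
      rw [hfilter] at hpk
      cases hd : rest.dropWhile q with
      | nil =>
        rw [hd] at hinner
        simp only [pvAOuter, hinner, pvAInner]
        rw [show pvBRun c ([] : List String) = ([], []) from rfl]
        simp only [pvAOuter]
        rcases hpk with hc1 | ⟨hc2, hc3⟩
        · have hnone : PySem.List.pyGet? (k :: rest.takeWhile q) c = none := by
            rw [PySem.List.pyGet?_eq_none_iff]
            intro hin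
            exact absurd hin.2 (by omega)
          rw [if_neg (by omega), hnone]
          simp
        · obtain ⟨v, hv⟩ : ∃ v, PySem.List.pyGet? (k :: rest.takeWhile q) c = some v := by
            cases hg : PySem.List.pyGet? (k :: rest.takeWhile q) c with
            | none => exact absurd (show PySem.Raise.InRange (k :: rest.takeWhile q).length c from ⟨hc2, hc3⟩) ((PySem.List.pyGet?_eq_none_iff _ _).mp hg)
            | some v => exact ⟨v, rfl⟩
          rw [if_pos (by omega), hv]
          simp
      | cons h0 t0 =>
        rw [hd] at hinner hs' hlen'
        have hdw0 : ∀ x ∈ h0 :: t0, pvPref x ≠ pvPref k := by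
          intro x hx; exact hdw x (by rw [hd]; exact hx)
        have hstop : pvAInner (PySem.Str.slice k (some 0) (some 4)) (h0 :: t0) (k :: rest.takeWhile q) true =
            (k :: rest.takeWhile q, false) :=
          pvAInner_stop _ h0 t0 _ ((hdw0 h0 (by simp)) : pvPref h0 ≠ PySem.Str.slice k (some 0) (some 4))
        simp only [pvAOuter, hinner, hstop]
        have hall2 : done ++ (k :: rest) = (done ++ (k :: rest.takeWhile q)) ++ (h0 :: t0) := by
          rw [List.append_assoc, ← hd, List.cons_append, ← hsplit]
      -- hypotheses of the induction step on the dropped tail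
        have hdone2 : ∀ x ∈ done ++ (k :: rest.takeWhile q), pvPref x ∉ (h0 :: t0).map pvPref := by
          intro x hx hmem
          rcases List.mem_map.mp hmem with ⟨y, hy, he⟩
          rcases List.mem_append.mp hx with hx1 | hx2
          · apply hdone x hx1
            rw [← he]
            exact List.mem_map_of_mem (List.mem_cons_of_mem _ ((List.dropWhile_sublist q).mem (by rw [hd]; exact hy)))
          · exact hdw0 y hy (he.trans (htw x hx2))
        have hpre2 : ∀ k0 ∈ (h0 :: t0),
            (((h0 :: t0).filter (fun k' => PySem.Str.slice k' (some 0) (some 4) == PySem.Str.slice k0 (some 0) (some 4))).length : Int) < c ∨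
            (-((((h0 :: t0).filter (fun k' => PySem.Str.slice k' (some 0) (some 4) == PySem.Str.slice k0 (some 0) (some 4))).length : Int)) ≤ c ∧
              c < (((h0 :: t0).filter (fun k' => PySem.Str.slice k' (some 0) (some 4) == PySem.Str.slice k0 (some 0) (some 4))).length : Int)) := by
          intro k0 hk0
          have hk0rest : k0 ∈ k :: rest := by
            exact List.mem_cons_of_mem _ ((List.dropWhile_sublist q).mem (by rw [hd]; exact hk0))
          have heq : (k :: rest).filter (fun k' => PySem.Str.slice k' (some 0) (some 4) == PySem.Str.slice k0 (some 0) (some 4)) =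
              (h0 :: t0).filter (fun k' => PySem.Str.slice k' (some 0) (some 4) == PySem.Str.slice k0 (some 0) (some 4)) := by
            conv_lhs => rw [show k :: rest = (k :: rest.takeWhile q) ++ rest.dropWhile q by rw [List.cons_append, ← hsplit]]
            rw [List.filter_append, hd,
              List.filter_eq_nil_iff.mpr (by
                intro a ha
                simp only [beq_iff_eq]
                intro e
                exact hdw0 k0 hk0 ((congrArg pvPref rfl).trans (show pvPref k0 = pvPref k from by
                  have := htw a ha
                  simp only [pvPref] at this ⊢
                  rw [← e, this]))
                )]
            simp
          have := hpre k0 hk0rest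
          rw [heq] at this
          exact this
        rw [hall2]
        rw [ih (h0 :: t0) (done ++ (k :: rest.takeWhile q)) _ hlen' hs' hdone2 hpre2]
        rcases hpk with hc1 | ⟨hc2, hc3⟩
        · have hnone : PySem.List.pyGet? (k :: rest.takeWhile q) c = none := by
            rw [PySem.List.pyGet?_eq_none_iff]
            intro hin
            exact absurd hin.2 (by omega)
          rw [if_neg (by omega), hnone]
        · obtain ⟨v, hv⟩ : ∃ v, PySem.List.pyGet? (k :: rest.takeWhile q) c = some v := by
            cases hg : PySem.List.pyGet? (k :: rest.takeWhile q) c with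
            | none => exact absurd (show PySem.Raise.InRange (k :: rest.takeWhile q).length c from ⟨hc2, hc3⟩) ((PySem.List.pyGet?_eq_none_iff _ _).mp hg)
            | some v => exact ⟨v, rfl⟩
          rw [if_pos (by omega), hv]
          simp

-- ===== VERDICT (by name: the statement is the Claim_ definition above) =====
theorem getNRAlignmentIndex_spec : Claim_equal_getNRAlignmentIndex := by
  intro d c bln _ hpre
  unfold Spec_getNRAlignmentIndex getNRAlignmentIndex getNRAlignmentIndex_alt
  simp only [PySem.List.foldl_append_singleton_eq_map, List.nil_append, pvPref_eq]
  set K0 := PySem.Dict.keys (PySem.Dict.ofList d) with hK0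
  set allk := PySem.List.sorted K0 (fun x => x) false with hallk
  have hsort : List.Pairwise (· ≤ ·) allk := by
    simpa using PySem.List.sorted_pairwise K0 (fun x => x)
  -- transport Pre_ from the dict's key list to its sorted version
  have hpre' : ∀ k ∈ allk,
      ((allk.filter (fun k' => PySem.Str.slice k' (some 0) (some 4) == PySem.Str.slice k (some 0) (some 4))).length : Int) < c ∨
      (-(((allk.filter (fun k' => PySem.Str.slice k' (some 0) (some 4) == PySem.Str.slice k (some 0) (some 4))).length : Int)) ≤ c ∧
        c < ((allk.filter (fun k' => PySem.Str.slice k' (some 0) (some 4) == PySem.Str.slice k (some 0) (some 4))).length : Int)) := by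
    intro k hk
    have hkK0 : k ∈ K0 := (PySem.List.mem_sorted K0 (fun x => x) false k).mp hk
    have hperm : (allk.filter (fun k' => PySem.Str.slice k' (some 0) (some 4) == PySem.Str.slice k (some 0) (some 4))).length =
        (K0.filter (fun k' => PySem.Str.slice k' (some 0) (some 4) == PySem.Str.slice k (some 0) (some 4))).length :=
      ((PySem.List.sorted_perm K0 (fun x => x) false).filter _).length_eq
    rw [hperm]
    exact hpre k hkK0
  have hps : PySem.List.sorted (PySem.Set.ofList (allk.map pvPref)) (fun x => x) false = (pvBRun c allk).2 := by
    apply PySem.List.sorted_eq_of_perm_of_pairwise_lt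
    · rw [pvBRun_ps_eq c allk.length allk le_rfl hsort]
    · exact pvBRun_ps_lt c allk.length allk le_rfl hsort
  have hsel : pvAOuter c allk ((pvBRun c allk).2) false [] = (pvBRun c allk).1 := by
    have := pvM c allk.length allk [] [] le_rfl hsort (by simp) hpre'
    simpa using this
  rw [hps, hsel]
  rw [PySem.List.sorted_eq_self_of_pairwise _ _ (pvBRun_sel_pairwise c allk.length allk le_rfl hsort)]

@[simp] theorem getNRAlignmentIndex_raises : Claim_raises_getNRAlignmentIndex := by
  unfold Claim_raises_getNRAlignmentIndex
  exact ⟨fun _ _ _ _ h => h, by decide⟩
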